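-- pv_equiv track=rewrite | github.com/KugananK/Python-Assessment-1 | Code/python1.py | four
-- ===== SOURCE A (Python) =====
-- def four(arg1):
-- 	numList = arg1.split()
-- 	largest = 0
-- 	for x in numList:
-- 		size = 0
-- 		strNum = str(x)
-- 		for y in range(len(strNum)):
-- 			size += int(strNum[y])
-- 			if size > largest:
-- 				largest = size
--
-- 	return largest
-- ===== SOURCE B (Python) =====
-- def four(arg1):
--     cur = 0
--     largest = 0
--     for c in arg1:
--         if c.isspace():
--             if cur > largest:
--                 largest = cur
--             cur = 0
--         else:
--             cur += int(c)
--     return max(largest, cur)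
-- ===== Notes on version B (the rewrite author's own statement) =====
-- stated objective: alternative
-- what changed: Replaces split() plus a nested per-token indexing loop with a single character scan that keeps a running digit sum of the current token and the maximum so far, building no token list or substrings.
import Mathlib
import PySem

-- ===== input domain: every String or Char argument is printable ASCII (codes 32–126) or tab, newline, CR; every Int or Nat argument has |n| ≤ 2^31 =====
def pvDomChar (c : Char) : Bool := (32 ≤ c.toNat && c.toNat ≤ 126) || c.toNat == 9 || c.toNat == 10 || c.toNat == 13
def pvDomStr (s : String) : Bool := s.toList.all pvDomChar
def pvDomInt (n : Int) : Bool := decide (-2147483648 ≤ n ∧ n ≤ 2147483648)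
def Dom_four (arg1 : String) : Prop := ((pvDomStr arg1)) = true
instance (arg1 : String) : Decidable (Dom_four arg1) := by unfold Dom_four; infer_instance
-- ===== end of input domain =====

-- B replaces split() + a nested per-token indexing loop by a single character scan
-- keeping the current token's digit sum and the maximum so far (objective: alternative).

-- ===== PORT A =====
def four (arg1 : String) : Int :=
  let numList := PySem.Str.split₀ arg1
  numList.foldl
    (fun largest x =>
      let strNum := x
      ((PySem.List.pyRange 0 (PySem.Str.len strNum) 1).foldl
        (fun (st : Int × Int) y =>
          let size := st.1 + ((PySem.Str.pyGet? strNum y).bind (fun c => PySem.Int.ofChars? [c])).getD 0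
          (size, if size > st.2 then size else st.2))
        ((0 : Int), largest)).2)
    (0 : Int)

-- ===== PORT B =====
def four_alt (arg1 : String) : Int :=
  let st := arg1.toList.foldl
    (fun (st : Int × Int) c =>
      if PySem.Chars.isspace c then
        ((0 : Int), if st.1 > st.2 then st.1 else st.2)
      else
        (st.1 + (PySem.Int.ofChars? [c]).getD 0, st.2))
    ((0 : Int), (0 : Int))
  max st.2 st.1

-- ===== PRECONDITION & SPEC =====
-- Pre_ excludes exactly the inputs with a non-digit non-whitespace character, on which
-- A's int() raises ValueError (B raises the same way there).
def Pre_four (arg1 : String) : Prop :=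
  arg1.toList.all (fun c => ('0' ≤ c && c ≤ '9') || PySem.Chars.isspace c) = true
instance (arg1 : String) : Decidable (Pre_four arg1) := by unfold Pre_four; infer_instance
def pvWitness_four : String := "12  345 9"
def Spec_four (arg1 : String) (out : Int) : Prop := out = four_alt arg1
instance (arg1 : String) (out : Int) : Decidable (Spec_four arg1 out) := by
  unfold Spec_four; infer_instance

-- ===== CLAIM =====
def Claim_equal_four : Prop :=
  ∀ (arg1 : String), Dom_four arg1 → Pre_four arg1 → Spec_four arg1 (four arg1)

-- ===== LEMMAS AND PROOFS =====

-- int() of a single digit character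
theorem pv_digit_val (c : Char) (h1 : '0' ≤ c) (h2 : c ≤ '9') :
    (PySem.Int.ofChars? [c]).getD 0 = (c.toNat : Int) - 48 := by
  have h1' : 48 ≤ c.toNat := h1
  have h2' : c.toNat ≤ 57 := h2
  interval_cases h : c.toNat <;>
    first
    | (have hc : c = '0' := by apply Char.ext; apply UInt32.toNat_inj.mp; exact h
       subst hc; decide)
    | (have hc : c = '1' := by apply Char.ext; apply UInt32.toNat_inj.mp; exact h
       subst hc; decide)
    | (have hc : c = '2' := by apply Char.ext; apply UInt32.toNat_inj.mp; exact h
       subst hc; decide)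
    | (have hc : c = '3' := by apply Char.ext; apply UInt32.toNat_inj.mp; exact h
       subst hc; decide)
    | (have hc : c = '4' := by apply Char.ext; apply UInt32.toNat_inj.mp; exact h
       subst hc; decide)
    | (have hc : c = '5' := by apply Char.ext; apply UInt32.toNat_inj.mp; exact h
       subst hc; decide)
    | (have hc : c = '6' := by apply Char.ext; apply UInt32.toNat_inj.mp; exact h
       subst hc; decide)
    | (have hc : c = '7' := by apply Char.ext; apply UInt32.toNat_inj.mp; exact h
       subst hc; decide)
    | (have hc : c = '8' := by apply Char.ext; apply UInt32.toNat_inj.mp; exact h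
       subst hc; decide)
    | (have hc : c = '9' := by apply Char.ext; apply UInt32.toNat_inj.mp; exact h
       subst hc; decide)

def pvG (c : Char) : Int := (PySem.Int.ofChars? [c]).getD 0

theorem pvG_nonneg (c : Char) (h : '0' ≤ c ∧ c ≤ '9') : 0 ≤ pvG c := by
  have := pv_digit_val c h.1 h.2
  have h1' : 48 ≤ c.toNat := h.1
  unfold pvG; rw [this]; omega

def pvDsum (t : List Char) : Int := (t.map pvG).sum

theorem pvDsum_nonneg (t : List Char) (h : ∀ c ∈ t, '0' ≤ c ∧ c ≤ '9') : 0 ≤ pvDsum t := by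
  induction t with
  | nil => simp [pvDsum]
  | cons c t ih =>
    have h1 := pvG_nonneg c (h c (by simp))
    have h2 := ih (fun c hc => h c (by simp [hc]))
    simp only [pvDsum, List.map_cons, List.sum_cons] at *
    omega

-- the step functions of the two ports, over List Char
def pvStepA (st : Int × Int) (c : Char) : Int × Int :=
  (st.1 + pvG c, if st.1 + pvG c > st.2 then st.1 + pvG c else st.2)

def pvStepB (st : Int × Int) (c : Char) : Int × Int :=
  if PySem.Chars.isspace c then ((0 : Int), if st.1 > st.2 then st.1 else st.2)
  else (st.1 + pvG c, st.2)

def pvInner (t : List Char) (l : Int) : Int := (t.foldl pvStepA (0, l)).2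

def pvOuter (l : Int) (ts : List (List Char)) : Int := ts.foldl (fun l t => pvInner t l) l

-- A's inner loop computes max l (s + digit sum) once prefixes stay below the running max
theorem pv_innerA (t : List Char) : ∀ (s l : Int), (∀ c ∈ t, '0' ≤ c ∧ c ≤ '9') → s ≤ l →
    (t.foldl pvStepA (s, l)).2 = max l (s + pvDsum t) := by
  induction t with
  | nil => intro s l _ hsl; simp [pvDsum]; omega
  | cons c t ih =>
    intro s l h hsl
    have hc := h c (by simp)
    have hg := pvG_nonneg c hc
    have hd := pvDsum_nonneg t (fun c hct => h c (by simp [hct]))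
    have hle : s + pvG c ≤ if s + pvG c > l then s + pvG c else l := by split <;> omega
    rw [List.foldl_cons]
    show (t.foldl pvStepA (s + pvG c, if s + pvG c > l then s + pvG c else l)).2 = _
    rw [ih (s + pvG c) _ (fun c hct => h c (by simp [hct])) hle]
    simp only [pvDsum, List.map_cons, List.sum_cons]
    simp only [pvDsum] at hd
    split <;> omega

theorem pv_inner_eq (t : List Char) (l : Int) (h : ∀ c ∈ t, '0' ≤ c ∧ c ≤ '9') (hl : 0 ≤ l) :
    pvInner t l = max l (pvDsum t) := by
  unfold pvInner
  rw [pv_innerA t 0 l h hl]; simp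

-- split₀.go with a nonempty accumulator just prepends it
theorem pv_go_append : ∀ (cs curTok : List Char) (acc : List (List Char)),
    PySem.Chars.split₀.go cs curTok acc = acc.reverse ++ PySem.Chars.split₀.go cs curTok [] := by
  intro cs
  induction cs with
  | nil =>
    intro curTok acc
    rw [PySem.Chars.split₀.go, PySem.Chars.split₀.go]
    by_cases h : curTok.isEmpty <;> simp [h]
  | cons c rest ih =>
    intro curTok acc
    rw [PySem.Chars.split₀.go]
    conv_rhs => rw [PySem.Chars.split₀.go]
    by_cases hs : PySem.Chars.isspace c
    · by_cases he : curTok.isEmpty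
      · simp only [hs, he, if_true]
        exact ih [] acc
      · simp only [hs, he, if_true]
        rw [ih [] (curTok.reverse :: acc), ih [] [curTok.reverse]]
        simp
    · simp only [hs]
      exact ih (c :: curTok) acc

theorem pvDsum_append_one (t : List Char) (c : Char) :
    pvDsum (t ++ [c]) = pvDsum t + pvG c := by
  simp [pvDsum]

-- the heart: A's fold over split₀.go equals B's single scan
theorem pv_main : ∀ (cs curTok : List Char) (cur lg : Int),
    (∀ c ∈ cs, PySem.Chars.isspace c = false → ('0' ≤ c ∧ c ≤ '9')) →
    (∀ c ∈ curTok, '0' ≤ c ∧ c ≤ '9') →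
    cur = pvDsum curTok.reverse → 0 ≤ lg →
    pvOuter lg (PySem.Chars.split₀.go cs curTok []) =
      (fun st => max st.2 st.1) (cs.foldl pvStepB (cur, lg)) := by
  intro cs
  induction cs with
  | nil =>
    intro curTok cur lg _ hcur hc hl
    rw [PySem.Chars.split₀.go]
    by_cases he : curTok.isEmpty
    · have : curTok = [] := by cases curTok <;> simp_all
      subst this
      simp only [he, if_true]
      simp only [pvOuter, List.reverse_nil, List.foldl_nil]
      simp [pvDsum] at hc
      simp [hc]; omega
    · have hd : ∀ c ∈ curTok.reverse, '0' ≤ c ∧ c ≤ '9' := by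
        intro c hcm; exact hcur c (List.mem_reverse.mp hcm)
      simp only [he, Bool.false_eq_true, if_false]
      simp only [pvOuter, List.reverse_cons, List.reverse_nil, List.nil_append, List.foldl_cons,
        List.foldl_nil]
      rw [pv_inner_eq curTok.reverse lg hd hl, hc]
  | cons c rest ih =>
    intro curTok cur lg hcs hcur hc hl
    have hcs' : ∀ c ∈ rest, PySem.Chars.isspace c = false → ('0' ≤ c ∧ c ≤ '9') :=
      fun c hcm => hcs c (by simp [hcm])
    rw [PySem.Chars.split₀.go]
    by_cases hs : PySem.Chars.isspace c
    · have hcur0 : 0 ≤ cur := by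
        rw [hc]
        exact pvDsum_nonneg _ (fun c hcm => hcur c (List.mem_reverse.mp hcm))
      by_cases he : curTok.isEmpty
      · have hct : curTok = [] := by cases curTok <;> simp_all
        subst hct
        simp only [hs, he, if_true]
        rw [List.foldl_cons]
        show pvOuter lg (PySem.Chars.split₀.go rest [] []) =
          (fun st => max st.2 st.1) (rest.foldl pvStepB (pvStepB (cur, lg) c))
        have hB : pvStepB (cur, lg) c = (0, lg) := by
          simp [pvDsum] at hc
          simp [pvStepB, hs, hc]
          omega
        rw [hB, ih [] 0 lg hcs' (by simp) (by simp [pvDsum]) hl]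
      · simp only [hs, he, if_true, Bool.false_eq_true, if_false]
        rw [pv_go_append rest [] [curTok.reverse]]
        have hd : ∀ x ∈ curTok.reverse, '0' ≤ x ∧ x ≤ '9' := by
          intro x hx; exact hcur x (List.mem_reverse.mp hx)
        have houter : pvOuter lg ([curTok.reverse].reverse ++ PySem.Chars.split₀.go rest [] []) =
            pvOuter (pvInner curTok.reverse lg) (PySem.Chars.split₀.go rest [] []) := by
          simp only [List.reverse_cons, List.reverse_nil, List.nil_append]
          unfold pvOuter
          rw [List.foldl_append]
          rfl
        rw [houter, pv_inner_eq curTok.reverse lg hd hl]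
        rw [List.foldl_cons]
        have hB : pvStepB (cur, lg) c = (0, if cur > lg then cur else lg) := by
          simp [pvStepB, hs]
        rw [hB]
        have hmax : (if cur > lg then cur else lg) = max lg (pvDsum curTok.reverse) := by
          rw [← hc]; split <;> omega
        rw [hmax]
        exact ih [] 0 (max lg (pvDsum curTok.reverse)) hcs' (by simp) (by simp [pvDsum])
          (by omega)
    · have hcd : '0' ≤ c ∧ c ≤ '9' := hcs c (by simp) (by simp [hs])
      simp only [hs]
      rw [List.foldl_cons]
      have hB : pvStepB (cur, lg) c = (cur + pvG c, lg) := by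
        simp [pvStepB, hs, pvG]
      rw [hB]
      exact ih (c :: curTok) (cur + pvG c) lg hcs'
        (fun x hx => by
          rcases List.mem_cons.mp hx with hx | hx
          · subst hx; exact hcd
          · exact hcur x hx)
        (by rw [hc, List.reverse_cons, pvDsum_append_one]) hl

-- A's port, rewritten over List Char tokens
theorem pv_four_char (arg1 : String) :
    four arg1 = pvOuter 0 (PySem.Chars.split₀ arg1.toList) := by
  unfold four pvOuter
  rw [show PySem.Str.split₀ arg1 = (PySem.Chars.split₀ arg1.toList).map String.ofList from rfl]
  rw [List.foldl_map]
  apply PySem.List.foldl_congr_mem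
  intro l t _
  show (((PySem.List.pyRange 0 (PySem.Str.len (String.ofList t)) 1).foldl _ ((0 : Int), l)).2 : Int) = pvInner t l
  have hlen : PySem.Str.len (String.ofList t) = (t.length : Int) := by
    simp [PySem.Str.len]
  rw [hlen]
  unfold pvInner
  have hcongr : (PySem.List.pyRange 0 (t.length : Int) 1).foldl
      (fun (st : Int × Int) y =>
        let size := st.1 + ((PySem.Str.pyGet? (String.ofList t) y).bind
          (fun c => PySem.Int.ofChars? [c])).getD 0
        (size, if size > st.2 then size else st.2)) ((0 : Int), l)
      = (PySem.List.pyRange 0 (t.length : Int) 1).foldl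
      (fun (st : Int × Int) y => pvStepA st (PySem.List.pyGetD t y '0')) ((0 : Int), l) := by
    apply PySem.List.foldl_congr_mem
    intro st y hy
    have hy' := (PySem.List.mem_pyRange_one).mp hy
    have hget : PySem.Str.pyGet? (String.ofList t) y = some (PySem.List.pyGetD t y '0') := by
      have h1 : PySem.Str.pyGet? (String.ofList t) y = PySem.List.pyGet? t y := by
        simp [PySem.Str.pyGet?]
      rw [h1]
      unfold PySem.List.pyGetD
      have h0 : ((y.toNat : Nat) : Int) = y := Int.toNat_of_nonneg hy'.1
      have h2 : y.toNat < t.length := by omega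
      rw [← h0, PySem.List.pyGet?_natCast, List.getElem?_eq_getElem h2]
      rfl
    rw [hget]
    simp [pvStepA, pvG]
  rw [hcongr]
  exact congrArg Prod.snd (PySem.List.foldl_pyRange_zero_pyGetD' t '0'
    (fun (st : Int × Int) c => pvStepA st c) ((0 : Int), l))

-- B's port, phrased with pvStepB
theorem pv_four_alt_char (arg1 : String) :
    four_alt arg1 = (fun st => max st.2 st.1) (arg1.toList.foldl pvStepB ((0 : Int), (0 : Int))) :=
  rfl

-- ===== VERDICT =====
theorem four_spec : Claim_equal_four := by
  intro arg1 _ hpre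
  unfold Spec_four
  rw [pv_four_char, pv_four_alt_char]
  unfold Pre_four at hpre
  rw [List.all_eq_true] at hpre
  have hcs : ∀ c ∈ arg1.toList, PySem.Chars.isspace c = false → ('0' ≤ c ∧ c ≤ '9') := by
    intro c hcm hsp
    have := hpre c hcm
    simp [hsp] at this
    exact ⟨by exact_mod_cast this.1, by exact_mod_cast this.2⟩
  have := pv_main arg1.toList [] 0 0 hcs (by simp) (by simp [pvDsum]) le_rfl
  rw [show PySem.Chars.split₀ arg1.toList = PySem.Chars.split₀.go arg1.toList [] [] from rfl]
  rw [this]
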